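-- pv_equiv track=rewrite | github.com/beraterkanelcelik/customer-agent | app/agents/booking_agent.py | _is_useful_message
-- ===== SOURCE A (Python) =====
-- def _is_useful_message(content: str) -> bool:
--     """Check if a message is useful (not an error/confusion message)."""
--     if not content:
--         return False
--
--     unhelpful_phrases = [
--         "issue with your message", "please repeat", "didn't catch",
--         "error in your message", "please clarify", "try again",
--         "couldn't understand", "not sure what"
--     ]
--     content_lower = content.lower()
--     return not any(phrase in content_lower for phrase in unhelpful_phrases)
-- ===== SOURCE B (Python) =====
-- _UNHELPFUL_PHRASES = (
--     "issue with your message", "please repeat", "didn't catch",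
--     "error in your message", "please clarify", "try again",
--     "couldn't understand", "not sure what"
-- )
--
--
-- def _is_useful_message(content: str) -> bool:
--     """Check if a message is useful (not an error/confusion message)."""
--     if not content:
--         return False
--     low = content.lower()
--     # single left-to-right scan over positions: at each position test whether
--     # any unhelpful phrase starts exactly here
--     for i in range(len(low)):
--         for p in _UNHELPFUL_PHRASES:
--             if low.startswith(p, i):
--                 return False
--     return True
-- ===== Notes on version B (the rewrite author's own statement) =====
-- stated objective: alternative
-- what changed: Instead of eight independent full substring searches combined with any(phrase in content_lower), B lowercases once and makes a single position-major left-to-right scan, testing at each position whether any phrase starts exactly there (low.startswith(p, i)), returning False on the first hit.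
import Mathlib
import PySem

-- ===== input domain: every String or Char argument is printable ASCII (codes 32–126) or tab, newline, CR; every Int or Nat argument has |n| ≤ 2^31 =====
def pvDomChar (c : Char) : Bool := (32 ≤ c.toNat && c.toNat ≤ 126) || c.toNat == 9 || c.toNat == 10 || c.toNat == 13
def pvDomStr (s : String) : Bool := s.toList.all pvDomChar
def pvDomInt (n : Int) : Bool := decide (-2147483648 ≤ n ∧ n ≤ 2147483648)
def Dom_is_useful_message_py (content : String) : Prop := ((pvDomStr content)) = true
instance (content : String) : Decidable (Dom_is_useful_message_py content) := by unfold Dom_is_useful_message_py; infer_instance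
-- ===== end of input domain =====

-- B replaces A's phrase-major 'any(phrase in content_lower)' by one position-major
-- left-to-right scan testing each phrase as a prefix at every position (alternative, not faster).

-- ===== PORT A =====
def unhelpfulPhrases : List String :=
  ["issue with your message", "please repeat", "didn't catch",
   "error in your message", "please clarify", "try again",
   "couldn't understand", "not sure what"]

def is_useful_message_py (content : String) : Bool :=
  if content.toList.isEmpty then false
  else
    let content_lower := PySem.Str.lower content
    !(unhelpfulPhrases.any (fun phrase => PySem.Str.isIn phrase content_lower))

-- ===== PORT B =====
def unhelpfulPhrasesB : List (List Char) :=
  ["issue with your message".toList, "please repeat".toList, "didn't catch".toList,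
   "error in your message".toList, "please clarify".toList, "try again".toList,
   "couldn't understand".toList, "not sure what".toList]

-- the position-major scan: at each suffix, does some phrase start here?
def altScan : List Char → Bool
  | [] => true
  | c :: t => if unhelpfulPhrasesB.any (fun p => p.isPrefixOf (c :: t)) then false else altScan t

def is_useful_message_py_alt (content : String) : Bool :=
  if content.toList.isEmpty then false
  else altScan (PySem.Str.lower content).toList

-- ===== PRECONDITION & SPEC =====
def Spec_is_useful_message_py (content : String) (out : Bool) : Prop := out = is_useful_message_py_alt content
instance (content : String) (out : Bool) : Decidable (Spec_is_useful_message_py content out) := by unfold Spec_is_useful_message_py; infer_instance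

-- ===== CLAIM (what is proved, stated in full; the proofs are below) =====
def Claim_equal_is_useful_message_py : Prop := ∀ (content : String), Dom_is_useful_message_py content → Spec_is_useful_message_py content (is_useful_message_py content)

-- ===== LEMMAS AND PROOFS =====

lemma altScan_eq_not_any (s : List Char) :
    altScan s = !(unhelpfulPhrasesB.any (fun p => PySem.Chars.isIn p s)) := by
  induction s with
  | nil => decide
  | cons c t ih =>
      rw [altScan, ih]
      by_cases h : unhelpfulPhrasesB.any (fun p => p.isPrefixOf (c :: t)) = true
      · simp only [h, if_true]
        rw [List.any_eq_true] at h
        obtain ⟨p, hp, hpre⟩ := h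
        have : PySem.Chars.isIn p (c :: t) = true := by
          rw [PySem.Chars.isIn_iff_infix]
          exact (List.IsPrefix.isInfix (List.isPrefixOf_iff_prefix.mp hpre))
        have h2 : unhelpfulPhrasesB.any (fun p => PySem.Chars.isIn p (c :: t)) = true :=
          List.any_eq_true.mpr ⟨p, hp, this⟩
        rw [h2]; rfl
      · simp only [h, if_false, Bool.false_eq_true]
        congr 1
        apply Bool.eq_iff_iff.mpr
        simp only [List.any_eq_true]
        constructor
        · rintro ⟨p, hp, hin⟩
          refine ⟨p, hp, ?_⟩
          rw [PySem.Chars.isIn_iff_infix] at hin ⊢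
          exact hin.trans (List.suffix_cons c t).isInfix
        · rintro ⟨p, hp, hin⟩
          refine ⟨p, hp, ?_⟩
          rw [PySem.Chars.isIn_iff_infix] at hin ⊢
          rcases (List.infix_cons_iff).mp hin with hpre | hinf
          · exact absurd (List.any_eq_true.mpr ⟨p, hp, List.isPrefixOf_iff_prefix.mpr hpre⟩ :
              unhelpfulPhrasesB.any (fun p => p.isPrefixOf (c :: t)) = true) h
          · exact hinf

lemma any_isIn_bridge (cl : String) :
    unhelpfulPhrases.any (fun phrase => PySem.Str.isIn phrase cl)
      = unhelpfulPhrasesB.any (fun p => PySem.Chars.isIn p cl.toList) := by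
  simp [unhelpfulPhrases, unhelpfulPhrasesB, PySem.Str.isIn]

-- ===== VERDICT (by name: the statement is the Claim_ definition above) =====
theorem is_useful_message_py_spec : Claim_equal_is_useful_message_py := by
  intro content _
  unfold Spec_is_useful_message_py is_useful_message_py is_useful_message_py_alt
  by_cases h : content.toList.isEmpty
  · simp [h]
  · simp only [h, if_false, Bool.false_eq_true]
    rw [altScan_eq_not_any, any_isIn_bridge]
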